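-- pv_equiv track=rewrite | github.com/alexdarbyshire/theautonomouswriter | agent/validator.py | validate_no_empty_sections
-- ===== SOURCE A (Python) =====
-- def validate_no_empty_sections(body: str) -> tuple[bool, str]:
--     lines = body.strip().split("\n")
--     for i in range(len(lines) - 1):
--         current = lines[i].strip()
--         next_line = lines[i + 1].strip()
--         if current.startswith("##") and next_line.startswith("##"):
--             return False, f"Empty section: '{current}' followed immediately by '{next_line}'"
--     return True, "No empty sections found"
-- ===== SOURCE B (Python) =====
-- def validate_no_empty_sections(body: str) -> tuple[bool, str]:
--     lines = body.strip().split("\n")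
--     heads = [i for i, line in enumerate(lines) if line.strip().startswith("##")]
--     for a, b in zip(heads, heads[1:]):
--         if b == a + 1:
--             return False, f"Empty section: '{lines[a].strip()}' followed immediately by '{lines[b].strip()}'"
--     return True, "No empty sections found"
-- ===== Notes on version B (the rewrite author's own statement) =====
-- stated objective: alternative
-- what changed: B first builds a table of heading line indices in one pass, then scans that index list for an adjacent pair (b == a+1), instead of A's windowed scan over consecutive line pairs.
import Mathlib
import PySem

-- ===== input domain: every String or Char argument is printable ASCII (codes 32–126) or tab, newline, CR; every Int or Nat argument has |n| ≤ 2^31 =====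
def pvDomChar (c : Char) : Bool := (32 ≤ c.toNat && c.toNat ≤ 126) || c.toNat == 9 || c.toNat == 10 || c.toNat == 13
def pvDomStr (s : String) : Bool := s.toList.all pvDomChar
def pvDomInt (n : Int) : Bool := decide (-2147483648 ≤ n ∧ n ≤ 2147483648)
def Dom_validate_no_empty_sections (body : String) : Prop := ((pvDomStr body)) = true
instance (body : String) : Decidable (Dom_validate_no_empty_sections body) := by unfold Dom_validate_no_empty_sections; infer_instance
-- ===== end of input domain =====

-- B replaces A's windowed scan over consecutive line pairs by a heading-index table scanned
-- for an adjacent pair; same O(n) cost, different decomposition (objective: alternative).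

-- ===== PORT A =====
def aLoop (lines : List String) (i : Nat) : Bool × String :=
  if i + 1 < lines.length then
    let current := PySem.Str.strip (lines.getD i "")
    let next_line := PySem.Str.strip (lines.getD (i + 1) "")
    if PySem.Str.startswith current "##" && PySem.Str.startswith next_line "##" then
      (false, "Empty section: '" ++ current ++ "' followed immediately by '" ++ next_line ++ "'")
    else aLoop lines (i + 1)
  else (true, "No empty sections found")
termination_by lines.length - i

def validate_no_empty_sections (body : String) : Bool × String :=
  let lines := (PySem.Chars.splitOn (PySem.Str.strip body).toList "\n".toList).map String.ofList
  aLoop lines 0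

-- ===== PORT B =====
def bFindLoop (lines : List String) : List (Int × Int) → Bool × String
  | [] => (true, "No empty sections found")
  | (a, b) :: rest =>
    if b == a + 1 then
      (false, "Empty section: '" ++ PySem.Str.strip (PySem.List.pyGetD lines a "")
        ++ "' followed immediately by '" ++ PySem.Str.strip (PySem.List.pyGetD lines b "") ++ "'")
    else bFindLoop lines rest

def validate_no_empty_sections_alt (body : String) : Bool × String :=
  let lines := (PySem.Chars.splitOn (PySem.Str.strip body).toList "\n".toList).map String.ofList
  let heads := (PySem.List.enumerate lines 0).filterMap
      (fun p => if PySem.Str.startswith (PySem.Str.strip p.2) "##" then some p.1 else none)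
  bFindLoop lines (heads.zip heads.tail)

-- ===== PRECONDITION & SPEC =====
def Spec_validate_no_empty_sections (body : String) (out : Bool × String) : Prop := out = validate_no_empty_sections_alt body
instance (body : String) (out : Bool × String) : Decidable (Spec_validate_no_empty_sections body out) := by unfold Spec_validate_no_empty_sections; infer_instance

-- ===== CLAIM (what is proved, stated in full; the proofs are below) =====
def Claim_equal_validate_no_empty_sections : Prop := ∀ (body : String), Dom_validate_no_empty_sections body → Spec_validate_no_empty_sections body (validate_no_empty_sections body)

-- ===== LEMMAS AND PROOFS =====

def isHead (lines : List String) (j : Nat) : Bool :=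
  PySem.Str.startswith (PySem.Str.strip (lines.getD j "")) "##"

def msgAt (lines : List String) (a b : Nat) : Bool × String :=
  (false, "Empty section: '" ++ PySem.Str.strip (lines.getD a "")
    ++ "' followed immediately by '" ++ PySem.Str.strip (lines.getD b "") ++ "'")

lemma aLoop_eq (lines : List String) (i : Nat) :
    aLoop lines i =
      if i + 1 < lines.length then
        (if isHead lines i && isHead lines (i + 1) then msgAt lines i (i + 1)
         else aLoop lines (i + 1))
      else (true, "No empty sections found") := by
  rw [aLoop]; rfl

lemma bFindLoop_cons_nat (lines : List String) (a b : Nat) (rest : List (Int × Int)) :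
    bFindLoop lines (((a : Int), (b : Int)) :: rest) =
      if b = a + 1 then msgAt lines a b else bFindLoop lines rest := by
  rw [bFindLoop]
  by_cases h : b = a + 1
  · have ht : ((b : Int) == (a : Int) + 1) = true := by
      rw [beq_iff_eq, h]; push_cast; ring
    rw [if_pos ht, if_pos h]
    simp [msgAt, PySem.List.pyGetD_natCast]
  · have ht : ((b : Int) == (a : Int) + 1) = false := by
      simp only [beq_eq_false_iff_ne, ne_eq]
      intro hc; apply h
      have : (b : Int) = ((a + 1 : Nat) : Int) := by push_cast; omega
      exact Nat.cast_injective this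
    rw [if_neg (by simp [ht]), if_neg h]

lemma filterMap_enumerate (q : String → Bool) :
    ∀ (xs : List String) (s : Nat),
      (PySem.List.enumerate xs (s : Int)).filterMap
          (fun p => if q p.2 then some p.1 else none)
        = ((List.range' s xs.length).filter (fun j => q (xs.getD (j - s) ""))).map (Nat.cast : Nat → Int) := by
  intro xs
  induction xs with
  | nil => intro s; simp [PySem.List.enumerate_nil]
  | cons x xs ih =>
    intro s
    have h1 : ((s : Int) + 1) = ((s + 1 : Nat) : Int) := by push_cast; ring
    have hrest :
        ((List.range' (s+1) xs.length).filter (fun j => q ((x :: xs).getD (j - s) "")))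
          = ((List.range' (s+1) xs.length).filter (fun j => q (xs.getD (j - (s+1)) ""))) := by
      apply List.filter_congr
      intro j hj
      have hs1 : s + 1 ≤ j := (List.mem_range'_1.mp hj).1
      have hsub : j - s = (j - (s+1)) + 1 := by omega
      simp [hsub]
    have hstep : List.range' s (x :: xs).length = s :: List.range' (s+1) xs.length := by
      simp [List.range'_succ]
    have hx : ((x :: xs).getD (s - s) "") = x := by simp
    rw [PySem.List.enumerate_cons, List.filterMap_cons, hstep, List.filter_cons, hrest, hx,
      h1, ih (s+1)]
    cases hq : q x with
    | true => simp
    | false => simp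

lemma bFindLoop_skip (lines : List String) (i : Nat) (L : List Int)
    (hL : ∀ x ∈ L, ∃ j : Nat, x = (j : Int) ∧ i + 2 ≤ j) :
    bFindLoop lines (((i : Int) :: L).zip ((i : Int) :: L).tail)
      = bFindLoop lines (L.zip L.tail) := by
  cases L with
  | nil => rfl
  | cons x L' =>
    obtain ⟨j, rfl, hj⟩ := hL x (by simp)
    have : List.zip ((i : Int) :: (j : Int) :: L') ((j : Int) :: L')
        = ((i : Int), (j : Int)) :: List.zip ((j : Int) :: L') L' := rfl
    rw [List.tail_cons, this, bFindLoop_cons_nat, if_neg (by omega)]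
    rfl

lemma main_loop (lines : List String) :
    ∀ (n : Nat), ∀ (i : Nat), i + n = lines.length →
      aLoop lines i
        = bFindLoop lines
            ((((List.range' i n).filter (isHead lines)).map (Nat.cast : Nat → Int)).zip
              (((List.range' i n).filter (isHead lines)).map (Nat.cast : Nat → Int)).tail) := by
  intro n
  induction n using Nat.strong_induction_on with
  | _ n ih =>
    intro i hlen
    match n with
    | 0 =>
      rw [aLoop_eq, if_neg (by omega)]
      rfl
    | 1 =>
      rw [aLoop_eq, if_neg (by omega)]
      by_cases h : isHead lines i <;>
        simp [List.range'_succ, h, bFindLoop]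
    | (m + 2) =>
      have hlt : i + 1 < lines.length := by omega
      have hr : List.range' i (m + 2) = i :: List.range' (i+1) (m+1) := by
        simp [List.range'_succ]
      have ih1 := ih (m + 1) (by omega) (i + 1) (by omega)
      rw [aLoop_eq, if_pos hlt]
      by_cases h1 : isHead lines i
      · by_cases h2 : isHead lines (i + 1)
        · rw [if_pos (by rw [h1, h2]; rfl)]
          have hr2 : List.range' (i+1) (m+1) = (i+1) :: List.range' (i+2) m := by
            simp [List.range'_succ]
          rw [hr, hr2, List.filter_cons, if_pos h1, List.filter_cons, if_pos h2,
            List.map_cons, List.map_cons, List.tail_cons, List.zip_cons_cons,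
            bFindLoop_cons_nat, if_pos rfl]
        · rw [if_neg (by simp [h2])]
          have hF : (List.range' (i+1) (m+1)).filter (isHead lines)
              = (List.range' (i+2) m).filter (isHead lines) := by
            rw [show List.range' (i+1) (m+1) = (i+1) :: List.range' (i+2) m by
              simp [List.range'_succ]]
            rw [List.filter_cons, if_neg (by simp [h2])]
          rw [hr, List.filter_cons, if_pos h1, List.map_cons, hF, bFindLoop_skip, ih1, hF]
          intro x hx
          simp only [List.mem_map, List.mem_filter, List.mem_range'_1] at hx
          obtain ⟨j, ⟨⟨hj1, _⟩, _⟩, rfl⟩ := hx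
          exact ⟨j, rfl, hj1⟩
      · rw [if_neg (by simp [h1])]
        have hF : (List.range' i (m+2)).filter (isHead lines)
            = (List.range' (i+1) (m+1)).filter (isHead lines) := by
          rw [hr, List.filter_cons, if_neg (by simp [h1])]
        rw [ih1, hF]

lemma heads_eq (lines : List String) :
    (PySem.List.enumerate lines 0).filterMap
        (fun p => if PySem.Str.startswith (PySem.Str.strip p.2) "##" then some p.1 else none)
      = ((List.range' 0 lines.length).filter (isHead lines)).map (Nat.cast : Nat → Int) := by
  have h := filterMap_enumerate
    (fun s => PySem.Str.startswith (PySem.Str.strip s) "##") lines 0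
  have e0 : ((0 : Nat) : Int) = 0 := rfl
  rw [e0] at h
  rw [h]
  congr 1

-- ===== VERDICT (by name: the statement is the Claim_ definition above) =====
theorem validate_no_empty_sections_spec : Claim_equal_validate_no_empty_sections := by
  intro body _
  unfold Spec_validate_no_empty_sections
  simp only [validate_no_empty_sections, validate_no_empty_sections_alt]
  rw [heads_eq]
  exact main_loop _ _ 0 (Nat.zero_add _)
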